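-- pv_equiv track=rewrite | github.com/maddichaitanya/S2P_Intership | S2P/Day4/HomeWork/SubArray/evensum.py | longest_even_sum_subarray
-- ===== SOURCE A (Python) =====
-- def longest_even_sum_subarray(arr):
--     n = len(arr)
--     max_len = 0
--     for i in range(n):
--         total = 0
--         for j in range(i, n):
--             total += arr[j]
--             if total % 2 == 0:  # even sum
--                 max_len = max(max_len, j - i + 1)
--
--     return max_len
-- ===== SOURCE B (Python) =====
-- def longest_even_sum_subarray(arr):
--     # O(n) prefix-parity scan: the longest even-sum subarray spans two prefix
--     # indices with equal parity; track last even-parity index and first/last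
--     # odd-parity index of the running prefix sum.
--     p = 0
--     last_even = 0
--     first_odd = -1
--     last_odd = -1
--     k = 0
--     for x in arr:
--         k += 1
--         p = (p + x) % 2
--         if p == 0:
--             last_even = k
--         else:
--             if first_odd < 0:
--                 first_odd = k
--             last_odd = k
--     return max(last_even, last_odd - first_odd if first_odd >= 0 else 0)
-- ===== Notes on version B (the rewrite author's own statement) =====
-- stated objective: faster
-- what changed: Replaced the quadratic enumeration of all subarray sums by a single prefix-parity pass that records the last even-parity prefix index and the first/last odd-parity prefix index and returns the largest span.
import Mathlib
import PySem

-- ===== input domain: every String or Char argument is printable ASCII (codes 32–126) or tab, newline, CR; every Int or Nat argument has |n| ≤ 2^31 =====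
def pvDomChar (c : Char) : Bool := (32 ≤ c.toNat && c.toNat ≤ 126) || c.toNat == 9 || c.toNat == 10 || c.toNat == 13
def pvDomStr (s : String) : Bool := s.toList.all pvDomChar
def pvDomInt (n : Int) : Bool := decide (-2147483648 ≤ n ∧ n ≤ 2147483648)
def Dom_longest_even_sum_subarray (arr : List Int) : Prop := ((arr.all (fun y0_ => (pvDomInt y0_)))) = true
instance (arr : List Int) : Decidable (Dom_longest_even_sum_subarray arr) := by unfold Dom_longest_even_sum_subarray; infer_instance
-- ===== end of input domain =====

-- B replaces A's O(n^2) scan of all subarrays by a single prefix-parity pass.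

-- ===== PORT A =====
-- body of A's inner loop: total += arr[j]; if total % 2 == 0: max_len = max(max_len, j - i + 1)
def aInner (arr : List Int) (i : Int) (st : Int × Int) (j : Int) : Int × Int :=
  let total := st.1 + PySem.List.pyGetD arr j 0
  (total, if PySem.Int.mod total 2 = 0 then max st.2 (j - i + 1) else st.2)

def longest_even_sum_subarray (arr : List Int) : Int :=
  let n : Int := PySem.List.len arr
  (PySem.List.pyRange 0 n 1).foldl
    (fun max_len i => ((PySem.List.pyRange i n 1).foldl (aInner arr i) (0, max_len)).2) 0

-- ===== PORT B =====
-- state = (p, last_even, first_odd, last_odd, k)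
def lessAltStep (s : Int × Int × Int × Int × Int) (x : Int) : Int × Int × Int × Int × Int :=
  let k := s.2.2.2.2 + 1
  let p := PySem.Int.mod (s.1 + x) 2
  if p = 0 then (p, k, s.2.2.1, s.2.2.2.1, k)
  else if s.2.2.1 < 0 then (p, s.2.1, k, k, k)
  else (p, s.2.1, s.2.2.1, k, k)

def longest_even_sum_subarray_alt (arr : List Int) : Int :=
  let s := arr.foldl lessAltStep (0, 0, -1, -1, 0)
  max s.2.1 (if 0 ≤ s.2.2.1 then s.2.2.2.1 - s.2.2.1 else 0)

-- ===== PRECONDITION & SPEC =====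
def Spec_longest_even_sum_subarray (arr : List Int) (out : Int) : Prop := out = longest_even_sum_subarray_alt arr
instance (arr : List Int) (out : Int) : Decidable (Spec_longest_even_sum_subarray arr out) := by unfold Spec_longest_even_sum_subarray; infer_instance

-- ===== CLAIM (what is proved, stated in full; the proofs are below) =====
def Claim_equal_longest_even_sum_subarray : Prop := ∀ (arr : List Int), Dom_longest_even_sum_subarray arr → Spec_longest_even_sum_subarray arr (longest_even_sum_subarray arr)

-- ===== LEMMAS AND PROOFS =====

-- prefix sum of the first k elements, and its parity
def Sz (arr : List Int) (k : Int) : Int := (arr.take k.toNat).sum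
def ppz (arr : List Int) (k : Int) : Int := Sz arr k % 2

lemma ppz_zero (arr : List Int) : ppz arr 0 = 0 := by
  unfold ppz Sz; simp

lemma ppz_bounds (arr : List Int) (k : Int) : 0 ≤ ppz arr k ∧ ppz arr k < 2 := by
  unfold ppz; omega

lemma Sz_succ_nat (arr : List Int) (k : Nat) (h : k < arr.length) :
    Sz arr ((k : Int) + 1) = Sz arr (k : Int) + arr[k] := by
  unfold Sz
  have h1 : ((k : Int) + 1).toNat = k + 1 := by omega
  have h2 : ((k : Int)).toNat = k := by omega
  rw [h1, h2, List.take_add_one, List.getElem?_eq_getElem h, List.sum_append]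
  simp

lemma Sz_succ (arr : List Int) (k : Int) (h0 : 0 ≤ k) (h : k < (arr.length : Int)) :
    Sz arr (k + 1) = Sz arr k + PySem.List.pyGetD arr k 0 := by
  have hk : k.toNat < arr.length := by omega
  have hcast : k = ((k.toNat : Nat) : Int) := by omega
  rw [hcast, PySem.List.pyGetD_natCast, Sz_succ_nat arr k.toNat hk]
  simp [List.getD_eq_getElem?_getD, List.getElem?_eq_getElem hk]

-- the A-side inner fold, started at position j with the correct running total
def innerRes (arr : List Int) (i j m : Int) : Int :=
  ((PySem.List.pyRange j (arr.length : Int) 1).foldl (aInner arr i) (Sz arr j - Sz arr i, m)).2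

lemma inner_go (arr : List Int) (i : Int) (hi : 0 ≤ i) (fuel : Nat) :
    ∀ (j m : Int), i ≤ j → j ≤ (arr.length : Int) → ((arr.length : Int) - j).toNat = fuel →
      m ≤ innerRes arr i j m ∧
      (∀ b : Int, j < b → b ≤ (arr.length : Int) → ppz arr b = ppz arr i → b - i ≤ innerRes arr i j m) ∧
      (innerRes arr i j m = m ∨ ∃ b : Int, j < b ∧ b ≤ (arr.length : Int) ∧ ppz arr b = ppz arr i ∧ innerRes arr i j m = b - i) := by
  induction fuel with
  | zero =>
    intro j m hij hj hf
    have hj' : (arr.length : Int) ≤ j := by omega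
    have hr : innerRes arr i j m = m := by
      unfold innerRes
      rw [PySem.List.pyRange_one_eq_nil hj']
      simp
    refine ⟨le_of_eq hr.symm, fun b hb1 hb2 _ => absurd (lt_of_lt_of_le hb1 hb2) (by omega), Or.inl hr⟩
  | succ f ih =>
    intro j m hij hj hf
    have hjn : j < (arr.length : Int) := by omega
    have hcond : (PySem.Int.mod (Sz arr (j + 1) - Sz arr i) 2 = 0) ↔ (ppz arr (j + 1) = ppz arr i) := by
      rw [PySem.Int.mod_eq_emod_of_pos (by norm_num)]
      unfold ppz; omega
    have hstep : innerRes arr i j m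
        = innerRes arr i (j + 1) (if ppz arr (j + 1) = ppz arr i then max m (j - i + 1) else m) := by
      unfold innerRes
      rw [PySem.List.pyRange_one_cons hjn]
      simp only [List.foldl_cons, aInner]
      have htot : Sz arr j - Sz arr i + PySem.List.pyGetD arr j 0 = Sz arr (j + 1) - Sz arr i := by
        rw [Sz_succ arr j (by omega) hjn]; ring
      rw [htot]
      simp only [hcond]
    set m' : Int := if ppz arr (j + 1) = ppz arr i then max m (j - i + 1) else m with hm'
    have hmm' : m ≤ m' := by
      rw [hm']; split
      · exact le_max_left _ _
      · exact le_refl m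
    obtain ⟨ih1, ih2, ih3⟩ := ih (j + 1) m' (by omega) (by omega) (by omega)
    rw [hstep]
    refine ⟨le_trans hmm' ih1, ?_, ?_⟩
    · intro b hb1 hb2 hbp
      rcases eq_or_lt_of_le (show j + 1 ≤ b by omega) with hb | hb
      · have hbp' : ppz arr (j + 1) = ppz arr i := by rw [hb]; exact hbp
        have : b - i ≤ m' := by
          rw [hm', if_pos hbp', show b - i = j - i + 1 by omega]
          exact le_max_right _ _
        exact le_trans this ih1
      · exact ih2 b hb hb2 hbp
    · rcases ih3 with h | ⟨b, hb1, hb2, hb3, hb4⟩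
      · rw [h, hm']
        by_cases hp : ppz arr (j + 1) = ppz arr i
        · rw [if_pos hp]
          rcases le_total (j - i + 1) m with hle | hle
          · exact Or.inl (max_eq_left hle)
          · exact Or.inr ⟨j + 1, by omega, by omega, hp, by rw [max_eq_right hle]; omega⟩
        · exact Or.inl (if_neg hp)
      · exact Or.inr ⟨b, by omega, hb2, hb3, hb4⟩

-- the A-side outer fold from index t
def outerRes (arr : List Int) (t m : Int) : Int :=
  (PySem.List.pyRange t (arr.length : Int) 1).foldl
    (fun max_len i => ((PySem.List.pyRange i (arr.length : Int) 1).foldl (aInner arr i) (0, max_len)).2) m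

lemma outer_go (arr : List Int) (fuel : Nat) :
    ∀ (t m : Int), 0 ≤ t → t ≤ (arr.length : Int) → ((arr.length : Int) - t).toNat = fuel →
      m ≤ outerRes arr t m ∧
      (∀ a b : Int, t ≤ a → a < b → b ≤ (arr.length : Int) → ppz arr b = ppz arr a → b - a ≤ outerRes arr t m) ∧
      (outerRes arr t m = m ∨ ∃ a b : Int, t ≤ a ∧ a < b ∧ b ≤ (arr.length : Int) ∧ ppz arr b = ppz arr a ∧ outerRes arr t m = b - a) := by
  induction fuel with
  | zero =>
    intro t m ht htn hf
    have ht' : (arr.length : Int) ≤ t := by omega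
    have hr : outerRes arr t m = m := by
      unfold outerRes
      rw [PySem.List.pyRange_one_eq_nil ht']
      simp
    refine ⟨le_of_eq hr.symm, fun a b ha hab hb _ => absurd hab (by omega), Or.inl hr⟩
  | succ f ih =>
    intro t m ht htn hf
    have htn' : t < (arr.length : Int) := by omega
    have hstep : outerRes arr t m = outerRes arr (t + 1) (innerRes arr t t m) := by
      have hin : innerRes arr t t m
          = (List.foldl (aInner arr t) (0, m) (PySem.List.pyRange t (arr.length : Int) 1)).2 := by
        unfold innerRes; rw [sub_self]
      unfold outerRes
      rw [PySem.List.pyRange_one_cons htn', List.foldl_cons, hin]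
    have hf2 : ((arr.length : Int) - (t + 1)).toNat = f := by omega
    obtain ⟨in1, in2, in3⟩ := inner_go arr t ht ((arr.length : Int) - t).toNat t m (le_refl t) (by omega) rfl
    obtain ⟨ih1, ih2, ih3⟩ := ih (t + 1) (innerRes arr t t m) (by omega) (by omega) hf2
    rw [hstep]
    refine ⟨le_trans in1 ih1, ?_, ?_⟩
    · intro a b ha hab hb hp
      rcases eq_or_lt_of_le ha with ha' | ha'
      · subst ha'
        exact le_trans (in2 b hab hb hp) ih1
      · exact ih2 a b (by omega) hab hb hp
    · rcases ih3 with h | ⟨a, b, ha, hab, hb, hp, hv⟩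
      · rw [h]
        rcases in3 with h' | ⟨b, hb1, hb2, hb3, hb4⟩
        · exact Or.inl h'
        · exact Or.inr ⟨t, b, le_refl t, hb1, hb2, hb3, hb4⟩
      · exact Or.inr ⟨a, b, le_trans (by omega : t ≤ t + 1) ha, hab, hb, hp, hv⟩

lemma A_char (arr : List Int) :
    (0 ≤ longest_even_sum_subarray arr) ∧
    (∀ a b : Int, 0 ≤ a → a < b → b ≤ (arr.length : Int) → ppz arr b = ppz arr a →
        b - a ≤ longest_even_sum_subarray arr) ∧
    (longest_even_sum_subarray arr = 0 ∨ ∃ a b : Int, 0 ≤ a ∧ a < b ∧ b ≤ (arr.length : Int) ∧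
        ppz arr b = ppz arr a ∧ longest_even_sum_subarray arr = b - a) := by
  have hA : longest_even_sum_subarray arr = outerRes arr 0 0 := by
    unfold longest_even_sum_subarray outerRes
    simp [PySem.List.len]
  obtain ⟨h1, h2, h3⟩ := outer_go arr ((arr.length : Int) - 0).toNat 0 0 (le_refl 0) (by omega) rfl
  rw [hA]
  exact ⟨h1, h2, h3⟩

-- B's fold state after the first k elements
def bState (arr : List Int) (k : Nat) : Int × Int × Int × Int × Int :=
  (arr.take k).foldl lessAltStep (0, 0, -1, -1, 0)

-- invariant: state = (prefix parity, last even-parity index, first odd, last odd, k)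
lemma B_inv (arr : List Int) :
    ∀ k : Nat, k ≤ arr.length →
      (bState arr k).1 = ppz arr (k : Int) ∧ (bState arr k).2.2.2.2 = (k : Int) ∧
      (0 ≤ (bState arr k).2.1 ∧ (bState arr k).2.1 ≤ (k : Int) ∧ ppz arr (bState arr k).2.1 = 0 ∧
        (∀ t : Int, 0 ≤ t → t ≤ (k : Int) → ppz arr t = 0 → t ≤ (bState arr k).2.1)) ∧
      (((bState arr k).2.2.1 = -1 ∧ (bState arr k).2.2.2.1 = -1 ∧
          ∀ t : Int, 0 ≤ t → t ≤ (k : Int) → ppz arr t ≠ 1) ∨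
       (0 ≤ (bState arr k).2.2.1 ∧ (bState arr k).2.2.1 ≤ (bState arr k).2.2.2.1 ∧
        (bState arr k).2.2.2.1 ≤ (k : Int) ∧
        ppz arr (bState arr k).2.2.1 = 1 ∧ ppz arr (bState arr k).2.2.2.1 = 1 ∧
        (∀ t : Int, 0 ≤ t → t ≤ (k : Int) → ppz arr t = 1 →
          (bState arr k).2.2.1 ≤ t ∧ t ≤ (bState arr k).2.2.2.1))) := by
  intro k
  induction k with
  | zero =>
    intro _
    refine ⟨(ppz_zero arr).symm, rfl,
      ⟨le_refl 0, le_refl 0, ppz_zero arr, fun t h1 h2 _ => by show t ≤ (0 : Int); omega⟩,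
      Or.inl ⟨rfl, rfl, fun t h1 h2 => ?_⟩⟩
    have ht : t = 0 := by omega
    rw [ht, ppz_zero arr]; omega
  | succ k ih =>
    intro hk1
    have hk : k < arr.length := by omega
    obtain ⟨hp, hkc, ⟨hle0, hle1, hle2, hle3⟩, hodd⟩ := ih (by omega)
    have htake : arr.take (k + 1) = arr.take k ++ [arr[k]] := by
      rw [List.take_add_one, List.getElem?_eq_getElem hk]; rfl
    have hfold : bState arr (k + 1) = lessAltStep (bState arr k) arr[k] := by
      unfold bState
      rw [htake, List.foldl_append]; rfl
    have hps : PySem.Int.mod ((bState arr k).1 + arr[k]) 2 = ppz arr ((k : Int) + 1) := by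
      rw [PySem.Int.mod_eq_emod_of_pos (by norm_num), hp]
      unfold ppz
      rw [Sz_succ_nat arr k hk]
      omega
    have hcast : ((k + 1 : Nat) : Int) = (k : Int) + 1 := by push_cast; ring
    have hpbounds := ppz_bounds arr ((k : Int) + 1)
    rw [hcast, hfold]
    by_cases hz : ppz arr ((k : Int) + 1) = 0
    · have hstep : lessAltStep (bState arr k) arr[k]
          = (ppz arr ((k : Int) + 1), (k : Int) + 1,
             (bState arr k).2.2.1, (bState arr k).2.2.2.1, (k : Int) + 1) := by
        unfold lessAltStep
        rw [hkc, hps, if_pos hz]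
      rw [hstep]
      refine ⟨rfl, rfl,
        ⟨by show (0 : Int) ≤ (k : Int) + 1; omega, le_refl _, hz,
          fun t ht1 ht2 _ => by show t ≤ (k : Int) + 1; omega⟩, ?_⟩
      rcases hodd with ⟨h1, h2, h3⟩ | ⟨h1, h2, h3, h4, h5, h6⟩
      · refine Or.inl ⟨h1, h2, fun t ht1 ht2 => ?_⟩
        rcases eq_or_lt_of_le ht2 with he | hlt
        · rw [he, hz]; omega
        · exact h3 t ht1 (by omega)
      · refine Or.inr ⟨h1, h2, by show (bState arr k).2.2.2.1 ≤ (k : Int) + 1; omega,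
          h4, h5, fun t ht1 ht2 ht3 => ?_⟩
        rcases eq_or_lt_of_le ht2 with he | hlt
        · exfalso; rw [he, hz] at ht3; exact absurd ht3 (by norm_num)
        · exact h6 t ht1 (by omega) ht3
    · have hz1 : ppz arr ((k : Int) + 1) = 1 := by omega
      rcases hodd with ⟨h1, h2, h3⟩ | ⟨h1, h2, h3, h4, h5, h6⟩
      · have hstep : lessAltStep (bState arr k) arr[k]
            = (ppz arr ((k : Int) + 1), (bState arr k).2.1,
               (k : Int) + 1, (k : Int) + 1, (k : Int) + 1) := by
          unfold lessAltStep
          rw [hkc, hps, if_neg hz, if_pos (by rw [h1]; norm_num)]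
        rw [hstep]
        refine ⟨rfl, rfl,
          ⟨hle0, by show (bState arr k).2.1 ≤ (k : Int) + 1; omega, hle2,
            fun t ht1 ht2 ht3 => ?_⟩, ?_⟩
        · rcases eq_or_lt_of_le ht2 with he | hlt
          · exfalso; rw [he, hz1] at ht3; exact absurd ht3 (by norm_num)
          · exact hle3 t ht1 (by omega) ht3
        · refine Or.inr ⟨by show (0 : Int) ≤ (k : Int) + 1; omega, le_refl _, le_refl _,
            hz1, hz1, fun t ht1 ht2 ht3 => ?_⟩
          rcases eq_or_lt_of_le ht2 with he | hlt
          · rw [he]; exact ⟨le_refl _, le_refl _⟩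
          · exact absurd ht3 (h3 t ht1 (by omega))
      · have hstep : lessAltStep (bState arr k) arr[k]
            = (ppz arr ((k : Int) + 1), (bState arr k).2.1,
               (bState arr k).2.2.1, (k : Int) + 1, (k : Int) + 1) := by
          unfold lessAltStep
          rw [hkc, hps, if_neg hz, if_neg (by omega)]
        rw [hstep]
        refine ⟨rfl, rfl,
          ⟨hle0, by show (bState arr k).2.1 ≤ (k : Int) + 1; omega, hle2,
            fun t ht1 ht2 ht3 => ?_⟩, ?_⟩
        · rcases eq_or_lt_of_le ht2 with he | hlt
          · exfalso; rw [he, hz1] at ht3; exact absurd ht3 (by norm_num)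
          · exact hle3 t ht1 (by omega) ht3
        · refine Or.inr ⟨h1, by show (bState arr k).2.2.1 ≤ (k : Int) + 1; omega,
            le_refl _, h4, hz1, fun t ht1 ht2 ht3 => ?_⟩
          rcases eq_or_lt_of_le ht2 with he | hlt
          · rw [he]; exact ⟨by show (bState arr k).2.2.1 ≤ (k : Int) + 1; omega, le_refl _⟩
          · have := h6 t ht1 (by omega) ht3
            exact ⟨this.1, by omega⟩

lemma B_char (arr : List Int) :
    (0 ≤ longest_even_sum_subarray_alt arr) ∧
    (∀ a b : Int, 0 ≤ a → a < b → b ≤ (arr.length : Int) → ppz arr b = ppz arr a →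
        b - a ≤ longest_even_sum_subarray_alt arr) ∧
    (longest_even_sum_subarray_alt arr = 0 ∨ ∃ a b : Int, 0 ≤ a ∧ a < b ∧ b ≤ (arr.length : Int) ∧
        ppz arr b = ppz arr a ∧ longest_even_sum_subarray_alt arr = b - a) := by
  obtain ⟨hp, hkc, ⟨hle0, hle1, hle2, hle3⟩, hodd⟩ := B_inv arr arr.length (le_refl _)
  have hBa : longest_even_sum_subarray_alt arr
      = max (bState arr arr.length).2.1
          (if 0 ≤ (bState arr arr.length).2.2.1
            then (bState arr arr.length).2.2.2.1 - (bState arr arr.length).2.2.1 else 0) := by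
    unfold longest_even_sum_subarray_alt bState
    rw [List.take_length]
  rw [hBa]
  refine ⟨le_trans hle0 (le_max_left _ _), ?_, ?_⟩
  · intro a b ha hab hb hpab
    have hpa := ppz_bounds arr a
    by_cases hpa0 : ppz arr a = 0
    · have hpb0 : ppz arr b = 0 := by rw [hpab, hpa0]
      have hble : b ≤ (bState arr arr.length).2.1 := hle3 b (by omega) hb hpb0
      have := le_max_left (bState arr arr.length).2.1
        (if 0 ≤ (bState arr arr.length).2.2.1
          then (bState arr arr.length).2.2.2.1 - (bState arr arr.length).2.2.1 else 0)
      omega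
    · have hpa1 : ppz arr a = 1 := by omega
      have hpb1 : ppz arr b = 1 := by rw [hpab, hpa1]
      rcases hodd with ⟨h1, h2, h3⟩ | ⟨h1, h2, h3, h4, h5, h6⟩
      · exact absurd hpa1 (h3 a ha (by omega))
      · have hfa := h6 a ha (by omega) hpa1
        have hfb := h6 b (by omega) hb hpb1
        have hmax := le_max_right (bState arr arr.length).2.1
          (if 0 ≤ (bState arr arr.length).2.2.1
            then (bState arr arr.length).2.2.2.1 - (bState arr arr.length).2.2.1 else 0)
        rw [if_pos h1] at hmax
        omega
  · rcases le_total (if 0 ≤ (bState arr arr.length).2.2.1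
        then (bState arr arr.length).2.2.2.1 - (bState arr arr.length).2.2.1 else 0)
        (bState arr arr.length).2.1 with hm | hm
    · rw [max_eq_left hm]
      rcases eq_or_lt_of_le hle0 with hz | hz
      · exact Or.inl hz.symm
      · exact Or.inr ⟨0, (bState arr arr.length).2.1, le_refl 0, hz, hle1,
          by rw [hle2, ppz_zero arr], by omega⟩
    · rw [max_eq_right hm]
      by_cases hfo : 0 ≤ (bState arr arr.length).2.2.1
      · rw [if_pos hfo]
        rcases hodd with ⟨h1, _, _⟩ | ⟨h1, h2, h3, h4, h5, _⟩
        · exfalso; omega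
        · rcases eq_or_lt_of_le h2 with he | hlt
          · exact Or.inl (by omega)
          · exact Or.inr ⟨(bState arr arr.length).2.2.1, (bState arr arr.length).2.2.2.1,
              h1, hlt, h3, by rw [h5, h4], rfl⟩
      · rw [if_neg hfo]
        exact Or.inl rfl

theorem longest_even_sum_subarray_spec : Claim_equal_longest_even_sum_subarray := by
  intro arr _
  unfold Spec_longest_even_sum_subarray
  obtain ⟨a0, aub, aex⟩ := A_char arr
  obtain ⟨b0, bub, bex⟩ := B_char arr
  apply le_antisymm
  · rcases aex with h | ⟨a, b, ha, hab, hb, hp, hv⟩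
    · rw [h]; exact b0
    · rw [hv]; exact bub a b ha hab hb hp
  · rcases bex with h | ⟨a, b, ha, hab, hb, hp, hv⟩
    · rw [h]; exact a0
    · rw [hv]; exact aub a b ha hab hb hp
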